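-- pv_equiv track=rewrite | github.com/vaishnavi-tg/Training_placement | superior_element.py | superior_element
-- ===== SOURCE A (Python) =====
-- def superior_element(arr):
--     max_element=float("-inf")
--     count=0
--
--
--     for i in range(len(arr)-1,-1,-1):
--         if(arr[i]>max_element):
--             count+=1
--             max_element=arr[i]
--     return count
-- ===== SOURCE B (Python) =====
-- def superior_element(arr):
--     n = len(arr)
--     return sum(1 for i in range(n) if all(arr[i] > arr[j] for j in range(i + 1, n)))
-- ===== Notes on version B (the rewrite author's own statement) =====
-- stated objective: simpler
-- what changed: Replaces the backward running-max pass holding (max_element, count) state with a stateless direct count of elements strictly greater than every later element, read straight off the definition.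
import Mathlib
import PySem

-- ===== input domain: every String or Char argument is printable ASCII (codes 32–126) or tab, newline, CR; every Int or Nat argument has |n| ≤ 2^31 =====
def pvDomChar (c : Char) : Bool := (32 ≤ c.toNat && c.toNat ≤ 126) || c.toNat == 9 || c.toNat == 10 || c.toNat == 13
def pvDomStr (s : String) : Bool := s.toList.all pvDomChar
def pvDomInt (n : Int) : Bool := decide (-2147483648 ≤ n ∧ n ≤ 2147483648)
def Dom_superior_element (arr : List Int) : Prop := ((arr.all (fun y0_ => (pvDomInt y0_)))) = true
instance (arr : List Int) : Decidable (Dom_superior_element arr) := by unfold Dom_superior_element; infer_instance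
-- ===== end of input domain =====

-- B replaces A's stateful backward running-max scan by a stateless direct count of
-- elements strictly greater than every later element (objective: simpler).

-- ===== PORT A =====
-- max_element starts at float("-inf"): modelled as Option Int, none = -inf (arr[i] > -inf is always true)
def pvGtMax (x : Int) (m : Option Int) : Bool :=
  match m with
  | none => true
  | some v => decide (v < x)

-- the for-loop over range(len(arr)-1,-1,-1): iterating i backwards over arr = forwards over arr.reverse
def pvALoop : List Int → Option Int → Int → Int
  | [], _, count => count
  | x :: rest, m, count =>
    if pvGtMax x m then pvALoop rest (some x) (count + 1) else pvALoop rest m count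

def superior_element (arr : List Int) : Int := pvALoop arr.reverse none 0

-- ===== PORT B =====
-- sum over i of 1 when all later elements are smaller: structural recursion, head vs its tail
def superior_element_alt (arr : List Int) : Int :=
  match arr with
  | [] => 0
  | x :: t => (if t.all (fun y => decide (y < x)) then 1 else 0) + superior_element_alt t

-- ===== PRECONDITION & SPEC =====
def Spec_superior_element (arr : List Int) (out : Int) : Prop := out = superior_element_alt arr
instance (arr : List Int) (out : Int) : Decidable (Spec_superior_element arr out) := by unfold Spec_superior_element; infer_instance

-- ===== CLAIM (what is proved, stated in full; the proofs are below) =====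
def Claim_equal_superior_element : Prop := ∀ (arr : List Int), Dom_superior_element arr → Spec_superior_element arr (superior_element arr)

-- ===== LEMMAS AND PROOFS =====
theorem pvALoop_acc (l : List Int) : ∀ (m : Option Int) (c : Int),
    pvALoop l m c = c + pvALoop l m 0 := by
  induction l with
  | nil => intro m c; simp [pvALoop]
  | cons x t ih =>
    intro m c
    simp only [pvALoop]
    by_cases h : pvGtMax x m = true
    · simp [h, ih (some x) (c + 1), ih (some x) 1]; ring
    · simp only [h, if_false, Bool.false_eq_true]
      exact ih m c

theorem pvALoop_append_single (s : List Int) : ∀ (m : Option Int) (x : Int),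
    pvALoop (s ++ [x]) m 0 =
      pvALoop s m 0 + (if pvGtMax x m && s.all (fun y => decide (y < x)) then 1 else 0) := by
  induction s with
  | nil =>
    intro m x
    by_cases h : pvGtMax x m = true <;> simp [pvALoop, h]
  | cons h t ih =>
    intro m x
    simp only [List.cons_append, pvALoop]
    by_cases hg : pvGtMax h m = true
    · simp only [hg, if_true, zero_add]
      rw [pvALoop_acc (t ++ [x]) (some h) 1, pvALoop_acc t (some h) 1, ih (some h) x]
      have hcond : (pvGtMax x (some h) && t.all (fun y => decide (y < x)))
          = (pvGtMax x m && (h :: t).all (fun y => decide (y < x))) := by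
        cases m with
        | none => simp [pvGtMax, List.all_cons]
        | some v =>
          have hvh : v < h := by simpa [pvGtMax] using hg
          simp only [pvGtMax, List.all_cons]
          by_cases hhx : h < x
          · have hx : v < x := by omega
            simp [hx, hhx]
          · simp [hhx]
      rw [hcond]; ring
    · simp only [hg, if_false, Bool.false_eq_true]
      rw [ih m x]
      have hcond : (pvGtMax x m && t.all (fun y => decide (y < x)))
          = (pvGtMax x m && (h :: t).all (fun y => decide (y < x))) := by
        cases m with
        | none => simp [pvGtMax] at hg
        | some v =>
          simp only [pvGtMax, decide_eq_true_eq] at hg ⊢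
          simp only [List.all_cons]
          by_cases hx : v < x
          · have hhx : h < x := by omega
            simp [hx, hhx]
          · simp [hx]
      rw [hcond]

theorem alt_eq_aLoop (l : List Int) : superior_element_alt l = pvALoop l.reverse none 0 := by
  induction l with
  | nil => simp [superior_element_alt, pvALoop]
  | cons x t ih =>
    simp only [superior_element_alt, List.reverse_cons]
    rw [pvALoop_append_single t.reverse none x, ih]
    simp [pvGtMax, List.all_reverse]
    ring

-- ===== VERDICT (by name: the statement is the Claim_ definition above) =====
theorem superior_element_spec : Claim_equal_superior_element := by
  intro arr _
  unfold Spec_superior_element superior_element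
  exact (alt_eq_aLoop arr).symm
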